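-- pv_equiv track=rewrite | github.com/ucb-ee106/lab-availability-site | app.py | generate_lab_alt_text
-- ===== SOURCE A (Python) =====
-- TURTLEBOT_STATIONS = {1, 2, 3, 4, 5, 11}
--
-- UR7E_STATIONS = {6, 7, 8, 9, 10}
--
-- def generate_lab_alt_text(station_data):
--     """Generate descriptive alt text for screen readers."""
--     turtlebot_open = []
--     turtlebot_occupied = []
--     ur7e_open = []
--     ur7e_occupied = []
--
--     for station_num, is_occupied in station_data:
--         if station_num in TURTLEBOT_STATIONS:
--             if is_occupied:
--                 turtlebot_occupied.append(station_num)
--             else: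
--                 turtlebot_open.append(station_num)
--         elif station_num in UR7E_STATIONS:
--             if is_occupied:
--                 ur7e_occupied.append(station_num)
--             else:
--                 ur7e_open.append(station_num)
--
--     # Build descriptive text
--     parts = ["Cory 105 lab room layout showing station availability."]
--
--     # Turtlebot stations
--     if turtlebot_open:
--         parts.append(f"Turtlebot stations open: {', '.join(map(str, sorted(turtlebot_open)))}.")
--     if turtlebot_occupied:
--         parts.append(f"Turtlebot stations occupied: {', '.join(map(str, sorted(turtlebot_occupied)))}.")
--
--     # UR7e stations
--     if ur7e_open:
--         parts.append(f"UR7e stations open: {', '.join(map(str, sorted(ur7e_open)))}.")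
--     if ur7e_occupied:
--         parts.append(f"UR7e stations occupied: {', '.join(map(str, sorted(ur7e_occupied)))}.")
--
--     return " ".join(parts)
-- ===== SOURCE B (Python) =====
-- TURTLEBOT_STATIONS = {1, 2, 3, 4, 5, 11}
--
-- UR7E_STATIONS = {6, 7, 8, 9, 10}
--
--
-- def generate_lab_alt_text(station_data):
--     """Generate descriptive alt text for screen readers."""
--     parts = ["Cory 105 lab room layout showing station availability."]
--     table = (
--         ("Turtlebot stations open", TURTLEBOT_STATIONS, False),
--         ("Turtlebot stations occupied", TURTLEBOT_STATIONS, True),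
--         ("UR7e stations open", UR7E_STATIONS, False),
--         ("UR7e stations occupied", UR7E_STATIONS, True),
--     )
--     for title, stations, occupied in table:
--         nums = sorted(n for n, occ in station_data
--                       if n in stations and bool(occ) == occupied)
--         if nums:
--             parts.append(f"{title}: {', '.join(map(str, nums))}.")
--     return " ".join(parts)
-- ===== Notes on version B (the rewrite author's own statement) =====
-- stated objective: simpler
-- what changed: Replaces the four-way accumulator loop plus four hand-written format blocks with a single table-driven loop over (title, station-set, occupancy) entries, each filtering and sorting its stations in one comprehension.
import Mathlib
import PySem

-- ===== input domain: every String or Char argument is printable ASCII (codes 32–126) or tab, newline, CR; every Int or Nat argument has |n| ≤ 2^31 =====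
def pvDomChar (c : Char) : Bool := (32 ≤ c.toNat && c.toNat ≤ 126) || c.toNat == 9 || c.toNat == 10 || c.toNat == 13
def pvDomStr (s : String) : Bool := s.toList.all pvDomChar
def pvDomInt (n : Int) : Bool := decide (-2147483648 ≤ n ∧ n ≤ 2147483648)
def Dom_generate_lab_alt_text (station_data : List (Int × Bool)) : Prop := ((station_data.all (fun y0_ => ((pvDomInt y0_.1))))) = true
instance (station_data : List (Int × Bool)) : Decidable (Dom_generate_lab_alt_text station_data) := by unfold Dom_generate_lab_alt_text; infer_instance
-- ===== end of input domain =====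

-- B replaces A's four-way accumulator loop and four separate format blocks with one
-- table-driven loop that filters-and-sorts per category (objective: simpler).

-- ===== PORT A =====
def tbStations : List Int := [1, 2, 3, 4, 5, 11]
def urStations : List Int := [6, 7, 8, 9, 10]

-- the for-loop of A, carrying the four accumulator lists
def labLoopA : List (Int × Bool) → List Int × List Int × List Int × List Int → List Int × List Int × List Int × List Int
  | [], st => st
  | (n, occ) :: rest, (tOpen, tOcc, uOpen, uOcc) =>
    if tbStations.contains n then
      if occ then labLoopA rest (tOpen, tOcc ++ [n], uOpen, uOcc)
      else labLoopA rest (tOpen ++ [n], tOcc, uOpen, uOcc)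
    else if urStations.contains n then
      if occ then labLoopA rest (tOpen, tOcc, uOpen, uOcc ++ [n])
      else labLoopA rest (tOpen, tOcc, uOpen ++ [n], uOcc)
    else labLoopA rest (tOpen, tOcc, uOpen, uOcc)

def generate_lab_alt_text (station_data : List (Int × Bool)) : String :=
  let r := labLoopA station_data ([], [], [], [])
  let tOpen := r.1; let tOcc := r.2.1; let uOpen := r.2.2.1; let uOcc := r.2.2.2
  let parts := ["Cory 105 lab room layout showing station availability."]
  let parts := if tOpen ≠ [] then
      parts ++ ["Turtlebot stations open: " ++ PySem.Str.join ", " ((PySem.List.sorted tOpen (fun x => x) false).map PySem.Int.toStr) ++ "."]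
    else parts
  let parts := if tOcc ≠ [] then
      parts ++ ["Turtlebot stations occupied: " ++ PySem.Str.join ", " ((PySem.List.sorted tOcc (fun x => x) false).map PySem.Int.toStr) ++ "."]
    else parts
  let parts := if uOpen ≠ [] then
      parts ++ ["UR7e stations open: " ++ PySem.Str.join ", " ((PySem.List.sorted uOpen (fun x => x) false).map PySem.Int.toStr) ++ "."]
    else parts
  let parts := if uOcc ≠ [] then
      parts ++ ["UR7e stations occupied: " ++ PySem.Str.join ", " ((PySem.List.sorted uOcc (fun x => x) false).map PySem.Int.toStr) ++ "."]
    else parts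
  PySem.Str.join " " parts

-- ===== PORT B =====
def labTable : List (String × List Int × Bool) :=
  [("Turtlebot stations open", tbStations, false),
   ("Turtlebot stations occupied", tbStations, true),
   ("UR7e stations open", urStations, false),
   ("UR7e stations occupied", urStations, true)]

def generate_lab_alt_text_alt (station_data : List (Int × Bool)) : String :=
  let parts := labTable.foldl (fun parts e =>
      let nums := PySem.List.sorted
        ((station_data.filter (fun p => e.2.1.contains p.1 && (p.2 == e.2.2))).map Prod.fst)
        (fun x => x) false
      if nums ≠ [] then
        parts ++ [e.1 ++ ": " ++ PySem.Str.join ", " (nums.map PySem.Int.toStr) ++ "."]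
      else parts)
    ["Cory 105 lab room layout showing station availability."]
  PySem.Str.join " " parts

-- ===== PRECONDITION & SPEC =====
def Spec_generate_lab_alt_text (station_data : List (Int × Bool)) (out : String) : Prop := out = generate_lab_alt_text_alt station_data
instance (station_data : List (Int × Bool)) (out : String) : Decidable (Spec_generate_lab_alt_text station_data out) := by unfold Spec_generate_lab_alt_text; infer_instance

-- ===== CLAIM (what is proved, stated in full; the proofs are below) =====
def Claim_equal_generate_lab_alt_text : Prop := ∀ (station_data : List (Int × Bool)), Dom_generate_lab_alt_text station_data → Spec_generate_lab_alt_text station_data (generate_lab_alt_text station_data)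

-- ===== LEMMAS AND PROOFS =====

-- the two station sets are disjoint
lemma ur_not_tb (n : Int) (h : n ∈ urStations) : n ∉ tbStations := by
  simp [urStations, tbStations] at *
  omega

-- A's accumulator loop computes the four category filters, appended to the accumulators
lemma labLoopA_eq (data : List (Int × Bool)) (a b c d : List Int) :
    labLoopA data (a, b, c, d) =
      (a ++ (data.filter (fun p => tbStations.contains p.1 && (p.2 == false))).map Prod.fst,
       b ++ (data.filter (fun p => tbStations.contains p.1 && (p.2 == true))).map Prod.fst,
       c ++ (data.filter (fun p => urStations.contains p.1 && (p.2 == false))).map Prod.fst,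
       d ++ (data.filter (fun p => urStations.contains p.1 && (p.2 == true))).map Prod.fst) := by
  induction data generalizing a b c d with
  | nil => simp [labLoopA]
  | cons hd tl ih =>
    obtain ⟨n, occ⟩ := hd
    by_cases htb : n ∈ tbStations
    · have hur : n ∉ urStations := fun h => ur_not_tb n h htb
      cases occ <;> simp [labLoopA, htb, hur, ih, List.filter]
    · by_cases hur : n ∈ urStations
      · cases occ <;> simp [labLoopA, htb, hur, ih, List.filter]
      · cases occ <;> simp [labLoopA, htb, hur, ih, List.filter]

-- ===== VERDICT (by name: the statement is the Claim_ definition above) =====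
theorem generate_lab_alt_text_spec : Claim_equal_generate_lab_alt_text := by
  intro data _
  unfold Spec_generate_lab_alt_text generate_lab_alt_text generate_lab_alt_text_alt labTable
  rw [labLoopA_eq]
  simp only [List.foldl, List.nil_append, ne_eq, PySem.List.sorted_eq_nil_iff]
  rw [show ∀ s : String, "Turtlebot stations open" ++ ": " ++ s = "Turtlebot stations open: " ++ s from fun _ => rfl,
      show ∀ s : String, "Turtlebot stations occupied" ++ ": " ++ s = "Turtlebot stations occupied: " ++ s from fun _ => rfl,
      show ∀ s : String, "UR7e stations open" ++ ": " ++ s = "UR7e stations open: " ++ s from fun _ => rfl,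
      show ∀ s : String, "UR7e stations occupied" ++ ": " ++ s = "UR7e stations occupied: " ++ s from fun _ => rfl]
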